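-- pv_equiv track=rewrite | github.com/Riolku/setter-suite | scripts/checkers.py | _skip_spaces
-- ===== SOURCE A (Python) =====
-- from typing import Tuple
--
-- def isline(c: str) -> bool:
--     return c in "\n\r"
--
-- def iswhite(c: str) -> bool:
--     return c in " \t\v\f\n\r"
--
-- def _skip_spaces(s: str, pos: int) -> Tuple[int, int]:
--     saw_line = saw_space = 0
--     while pos < len(s):
--         saw_line |= isline(s[pos])
--         if not iswhite(s[pos]):
--             break
--         pos += 1
--         saw_space = 1
--
--     return (2 if saw_line else saw_space, pos)
-- ===== SOURCE B (Python) =====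
-- def isline(c: str) -> bool:
--     return c in "\n\r"
--
-- def iswhite(c: str) -> bool:
--     return c in " \t\v\f\n\r"
--
-- def _skip_spaces(s, pos):
--     # Phase 1: minimal skip loop (no flags).
--     start = pos
--     n = len(s)
--     while pos < n and iswhite(s[pos]):
--         pos += 1
--     # Phase 2: classify the skipped region after the fact.
--     saw_line = any(isline(s[i]) for i in range(start, pos))
--     return (2 if saw_line else (1 if pos > start else 0), pos)
-- ===== Notes on version B (the rewrite author's own statement) =====
-- stated objective: simpler
-- what changed: Replaces the fused loop that interleaves saw_line/saw_space flag updates with a flag-free skip loop followed by a separate second pass that classifies the skipped region; Pre_ excludes only pos < -len(s), where A raises IndexError (B raises there too).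
import Mathlib
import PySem

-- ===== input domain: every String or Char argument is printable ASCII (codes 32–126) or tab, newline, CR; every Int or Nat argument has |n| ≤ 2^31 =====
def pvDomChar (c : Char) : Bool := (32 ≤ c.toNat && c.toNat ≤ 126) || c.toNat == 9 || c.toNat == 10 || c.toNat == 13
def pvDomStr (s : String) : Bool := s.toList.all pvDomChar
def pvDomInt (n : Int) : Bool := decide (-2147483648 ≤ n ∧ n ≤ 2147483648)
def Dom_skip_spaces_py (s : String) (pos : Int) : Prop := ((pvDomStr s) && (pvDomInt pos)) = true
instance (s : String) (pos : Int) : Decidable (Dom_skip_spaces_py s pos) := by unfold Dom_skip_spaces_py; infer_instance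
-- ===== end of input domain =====

-- B replaces A's fused loop (interleaved saw_line/saw_space flag updates + break) by a
-- flag-free skip loop and a separate second pass classifying the skipped index range (objective: simpler).

-- ===== PORT A =====

def pvIsline (c : Char) : Bool := ("\n\r".toList).contains c

def pvIswhite (c : Char) : Bool := ([' ', '\t', Char.ofNat 11, Char.ofNat 12, '\n', '\r']).contains c

-- A's while loop; state = (saw_line, saw_space, pos); `saw_line |= isline(...)` on 0/1 ints
-- is modelled as `if isline then 1 else saw_line`. pyGet? none (IndexError) is outside Pre_.
-- fuel is only a totality guard: the caller passes enough for every iteration of the while loop.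
def pvLoopA (cs : List Char) : Nat → Int → Int → Int → Int × Int × Int
  | 0, pos, saw_line, saw_space => (saw_line, saw_space, pos)   -- fuel exhausted: unreachable from skip_spaces_py
  | fuel + 1, pos, saw_line, saw_space =>
    if pos < (cs.length : Int) then
      match PySem.List.pyGet? cs pos with
      | none => (saw_line, saw_space, pos)   -- IndexError; excluded by Pre_
      | some c =>
        let saw_line' := if pvIsline c then 1 else saw_line
        if pvIswhite c then pvLoopA cs fuel (pos + 1) saw_line' 1
        else (saw_line', saw_space, pos)
    else (saw_line, saw_space, pos)

def skip_spaces_py (s : String) (pos : Int) : Int × Int :=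
  let cs := s.toList
  let r := pvLoopA cs (((cs.length : Int) - pos).toNat + 1) pos 0 0
  ((if r.1 ≠ 0 then 2 else r.2.1), r.2.2)

-- ===== PORT B =====

-- phase 1: minimal skip loop, returns the final pos (fuel: totality guard only, as above)
def pvLoopB (cs : List Char) : Nat → Int → Int
  | 0, pos => pos   -- fuel exhausted: unreachable from skip_spaces_py_alt
  | fuel + 1, pos =>
    if pos < (cs.length : Int) then
      match PySem.List.pyGet? cs pos with
      | none => pos   -- IndexError; excluded by Pre_
      | some c => if pvIswhite c then pvLoopB cs fuel (pos + 1) else pos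
    else pos

-- phase 2: any(isline(s[i]) for i in range(start, pos))
def pvSawLineB (cs : List Char) (start stop : Int) : Bool :=
  (PySem.List.pyRange start stop 1).any fun i =>
    match PySem.List.pyGet? cs i with
    | some c => pvIsline c
    | none => false

def skip_spaces_py_alt (s : String) (pos : Int) : Int × Int :=
  let cs := s.toList
  let start := pos
  let p := pvLoopB cs (((cs.length : Int) - pos).toNat + 1) pos
  let saw_line := pvSawLineB cs start p
  ((if saw_line then 2 else if p > start then 1 else 0), p)

-- ===== PRECONDITION & SPEC =====
-- Pre_ excludes exactly the inputs with pos < -len(s), on which Python A raises IndexError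
-- (negative index out of range); B raises there too.
def Pre_skip_spaces_py (s : String) (pos : Int) : Prop := -(s.toList.length : Int) ≤ pos
instance (s : String) (pos : Int) : Decidable (Pre_skip_spaces_py s pos) := by unfold Pre_skip_spaces_py; infer_instance

def pvWitness_skip_spaces_py : String × Int := ("  x", 0)

def Spec_skip_spaces_py (s : String) (pos : Int) (out : Int × Int) : Prop := out = skip_spaces_py_alt s pos
instance (s : String) (pos : Int) (out : Int × Int) : Decidable (Spec_skip_spaces_py s pos out) := by unfold Spec_skip_spaces_py; infer_instance

-- ===== CLAIM (what is proved, stated in full; the proofs are below) =====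
def Claim_equal_skip_spaces_py : Prop := ∀ (s : String) (pos : Int), Dom_skip_spaces_py s pos → Pre_skip_spaces_py s pos → Spec_skip_spaces_py s pos (skip_spaces_py s pos)

-- ===== LEMMAS AND PROOFS =====

-- a char failing iswhite also fails isline
theorem pvIsline_of_not_iswhite {c : Char} (h : pvIswhite c = false) : pvIsline c = false := by
  simp [pvIswhite, pvIsline] at *
  tauto

-- B's loop never moves backwards
theorem pvLoopB_ge (cs : List Char) (fuel : Nat) (pos : Int) : pos ≤ pvLoopB cs fuel pos := by
  induction fuel generalizing pos with
  | zero => simp [pvLoopB]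
  | succ f ih =>
    unfold pvLoopB
    split
    · split
      · omega
      · split
        · have := ih (pos + 1); omega
        · omega
    · omega

-- main invariant: A's loop result in terms of B's two phases (same fuel on both sides)
theorem pvLoopA_eq (cs : List Char) (fuel : Nat) (pos saw_line saw_space : Int)
    (hpre : -(cs.length : Int) ≤ pos) (hfuel : ((cs.length : Int) - pos).toNat < fuel) :
    pvLoopA cs fuel pos saw_line saw_space =
      ((if pvSawLineB cs pos (pvLoopB cs fuel pos) then 1 else saw_line),
       (if pos < pvLoopB cs fuel pos then 1 else saw_space),
       pvLoopB cs fuel pos) := by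
  induction fuel generalizing pos saw_line saw_space with
  | zero => omega
  | succ f ih =>
    rw [pvLoopA, pvLoopB]
    split
    · rename_i hlt
      have hin : PySem.Raise.InRange cs.length pos := by constructor <;> omega
      rcases hg : PySem.List.pyGet? cs pos with _ | c
      · exact absurd hg (by simp [PySem.List.pyGet?_eq_none_iff, hin])
      · by_cases hw : pvIswhite c
        · simp only [hw, if_pos]
          rw [ih (pos + 1) _ 1 (by omega) (by omega)]
          have hge := pvLoopB_ge cs f (pos + 1)
          have hrange : PySem.List.pyRange pos (pvLoopB cs f (pos + 1)) 1
              = pos :: PySem.List.pyRange (pos + 1) (pvLoopB cs f (pos + 1)) 1 :=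
            PySem.List.pyRange_one_cons (by omega)
          have hsaw : pvSawLineB cs pos (pvLoopB cs f (pos + 1))
              = (pvIsline c || pvSawLineB cs (pos + 1) (pvLoopB cs f (pos + 1))) := by
            unfold pvSawLineB
            rw [hrange, List.any_cons, hg]
          rw [hsaw]
          by_cases hl : pvIsline c <;> simp [hl] <;> omega
        · simp only [hw, if_neg, Bool.not_eq_true]
          have hrange : PySem.List.pyRange pos pos 1 = [] :=
            PySem.List.pyRange_one_eq_nil (by omega)
          have hl : pvIsline c = false := pvIsline_of_not_iswhite (by simpa using hw)
          simp [pvSawLineB, hrange, hl]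
    · rename_i hge
      have hrange : PySem.List.pyRange pos pos 1 = [] :=
        PySem.List.pyRange_one_eq_nil (by omega)
      simp [pvSawLineB, hrange]

-- ===== VERDICT (by name: the statement is the Claim_ definition above) =====
theorem skip_spaces_py_spec : Claim_equal_skip_spaces_py := by
  intro s pos _hdom hpre
  unfold Spec_skip_spaces_py skip_spaces_py skip_spaces_py_alt
  dsimp only
  rw [pvLoopA_eq s.toList _ pos 0 0 hpre (by omega)]
  simp
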